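-- pv_equiv track=rewrite | github.com/miliar/Code_Jam_Webscraper | solutions_python/solutions_year17_round1_nr1/51.py | row_shape
-- ===== SOURCE A (Python) =====
-- def row_shape(row):
--     out = []
--     first_c = None
--     for c in row:
--         if c != '?':
--             first_c = c
--             break
--     else:
--         assert False
--     current_c = first_c
--     for c in row:
--         if c != '?': current_c = c
--         out.append(current_c)
--     return ''.join(out)
-- ===== SOURCE B (Python) =====
-- def row_shape(row):
--     buf = list(row)
--     # forward sweep: fill each '?' with the last known char seen so far
--     last = None
--     for i, c in enumerate(buf):
--         if c != '?':
--             last = c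
--         elif last is not None:
--             buf[i] = last
--     # backward sweep: any '?' still left (a leading run) takes the next known char
--     nxt = None
--     for i in range(len(buf) - 1, -1, -1):
--         if buf[i] != '?':
--             nxt = buf[i]
--         else:
--             assert nxt is not None
--             buf[i] = nxt
--     return ''.join(buf)
-- ===== Notes on version B (the rewrite author's own statement) =====
-- stated objective: alternative
-- what changed: A first scans the row to find the first known character and then replays the whole row seeded with it; B instead does a forward fill-with-last-known sweep over a mutable list followed by a backward sweep that fills the remaining leading '?' run with the next known character.
-- outside the precondition, e.g. on row_shape('?'): A raises AssertionError, B raises AssertionError; on row_shape(''): A raises AssertionError, B returns ''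
import Mathlib
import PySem

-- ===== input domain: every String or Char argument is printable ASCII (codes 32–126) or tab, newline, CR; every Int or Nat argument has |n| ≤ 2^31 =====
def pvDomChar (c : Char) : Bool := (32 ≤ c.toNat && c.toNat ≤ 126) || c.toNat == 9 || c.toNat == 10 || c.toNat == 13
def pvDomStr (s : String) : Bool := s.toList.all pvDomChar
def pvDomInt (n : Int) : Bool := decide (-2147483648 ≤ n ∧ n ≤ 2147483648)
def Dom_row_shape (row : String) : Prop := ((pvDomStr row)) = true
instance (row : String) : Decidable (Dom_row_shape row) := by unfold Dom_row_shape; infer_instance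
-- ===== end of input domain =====

-- B replaces A's find-first-then-replay structure by a forward fill-with-last-known sweep
-- plus a backward sweep for the leading '?' run (alternative decomposition; same O(n) cost).
-- Pre_ excludes rows with no non-'?' character, on which A raises AssertionError.


-- ===== PORT A =====
-- A's first loop: find the first non-'?' character (for-else: assert False if none).
def pvFindFirst : List Char → Option Char
  | [] => none
  | c :: cs => if c ≠ '?' then some c else pvFindFirst cs

-- A's second loop: replay the row, updating current_c on each known char.
def pvFillA (cur : Char) : List Char → List Char
  | [] => []
  | c :: cs =>
    let cur' := if c ≠ '?' then c else cur
    cur' :: pvFillA cur' cs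

def row_shape (row : String) : String :=
  match pvFindFirst row.toList with
  | none => ""          -- Python: assert False (AssertionError); excluded by Pre_
  | some firstC => String.mk (pvFillA firstC row.toList)

-- ===== PORT B =====
-- B's forward sweep: fill each '?' with the last known char seen so far.
def pvFwd (last : Option Char) : List Char → List Char
  | [] => []
  | c :: cs =>
    if c ≠ '?' then c :: pvFwd (some c) cs
    else match last with
      | some k => k :: pvFwd (some k) cs
      | none => '?' :: pvFwd none cs

-- B's backward sweep (reversed index loop): fill remaining '?' with the next known char.
def pvBwd : List Char → Option Char × List Char
  | [] => (none, [])
  | c :: cs =>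
    let r := pvBwd cs
    if c ≠ '?' then (some c, c :: r.2)
    else match r.1 with
      | some k => (r.1, k :: r.2)
      | none => (none, '?' :: r.2)   -- Python: assert fires here; excluded by Pre_ (except row = "")

def row_shape_alt (row : String) : String :=
  String.mk (pvBwd (pvFwd none row.toList)).2

-- ===== PRECONDITION & SPEC =====
-- Pre_ excludes exactly the rows consisting only of '?' (including ""), on which A's
-- for-else hits `assert False` and raises AssertionError.
def Pre_row_shape (row : String) : Prop := row.toList.any (fun c => c ≠ '?') = true
instance (row : String) : Decidable (Pre_row_shape row) := by unfold Pre_row_shape; infer_instance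
def pvWitness_row_shape : String := "?a?"

def Spec_row_shape (row : String) (out : String) : Prop := out = row_shape_alt row
instance (row : String) (out : String) : Decidable (Spec_row_shape row out) := by unfold Spec_row_shape; infer_instance

-- ===== CLAIM (what is proved, stated in full; the proofs are below) =====
def Claim_equal_row_shape : Prop := ∀ (row : String), Dom_row_shape row → Pre_row_shape row → Spec_row_shape row (row_shape row)

-- ===== LEMMAS AND PROOFS =====

-- find? = some d decomposes the row as an all-'?' prefix, then d.
theorem pvFindFirst_decomp (cs : List Char) (d : Char) (h : pvFindFirst cs = some d) :
    ∃ p q, cs = p ++ d :: q ∧ (∀ c ∈ p, c = '?') ∧ d ≠ '?' := by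
  induction cs with
  | nil => simp [pvFindFirst] at h
  | cons c cs ih =>
    by_cases hc : c = '?'
    · simp [pvFindFirst, hc] at h
      obtain ⟨p, q, h1, h2, h3⟩ := ih h
      exact ⟨c :: p, q, by simp [h1], by simpa [hc] using h2, h3⟩
    · simp [pvFindFirst, hc] at h
      exact ⟨[], cs, by simp [h], by simp, h ▸ hc⟩

theorem pvFwd_some (k : Char) (cs : List Char) : pvFwd (some k) cs = pvFillA k cs := by
  induction cs generalizing k with
  | nil => rfl
  | cons c cs ih =>
    by_cases hc : c = '?' <;> simp [pvFwd, pvFillA, hc, ih]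

theorem pvFwd_none_prefix (p : List Char) (hp : ∀ c ∈ p, c = '?') (rest : List Char) :
    pvFwd none (p ++ rest) = p ++ pvFwd none rest := by
  induction p with
  | nil => rfl
  | cons c p ih =>
    have hc : c = '?' := hp c (by simp)
    simp [pvFwd, hc, ih (fun x hx => hp x (by simp [hx]))]

theorem pvFillA_no_q (cur : Char) (hcur : cur ≠ '?') (cs : List Char) :
    ∀ c ∈ pvFillA cur cs, c ≠ '?' := by
  induction cs generalizing cur with
  | nil => simp [pvFillA]
  | cons c cs ih =>
    intro x hx
    by_cases hc : c = '?'
    · simp [pvFillA, hc] at hx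
      rcases hx with h | h
      · exact h ▸ hcur
      · exact ih cur hcur x h
    · simp [pvFillA, hc] at hx
      rcases hx with h | h
      · exact h ▸ hc
      · exact ih c hc x h

theorem pvBwd_no_q (l : List Char) (hl : ∀ c ∈ l, c ≠ '?') : pvBwd l = (l.head?, l) := by
  induction l with
  | nil => rfl
  | cons c l ih =>
    have hc : c ≠ '?' := hl c (by simp)
    simp [pvBwd, hc, ih (fun x hx => hl x (by simp [hx]))]

theorem pvBwd_prefix (p : List Char) (hp : ∀ c ∈ p, c = '?') (d : Char) (l : List Char)
    (hl : pvBwd l = (some d, l)) :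
    pvBwd (p ++ l) = (some d, p.map (fun _ => d) ++ l) := by
  induction p with
  | nil => simpa using hl
  | cons c p ih =>
    have hc : c = '?' := hp c (by simp)
    simp [pvBwd, hc, ih (fun x hx => hp x (by simp [hx]))]

theorem pvFillA_prefix (d : Char) (p : List Char) (hp : ∀ c ∈ p, c = '?') (l : List Char) :
    pvFillA d (p ++ l) = p.map (fun _ => d) ++ pvFillA d l := by
  induction p with
  | nil => rfl
  | cons c p ih =>
    have hc : c = '?' := hp c (by simp)
    simp [pvFillA, hc, ih (fun x hx => hp x (by simp [hx]))]

theorem pvFindFirst_none (cs : List Char) (h : pvFindFirst cs = none) : ∀ c ∈ cs, c = '?' := by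
  induction cs with
  | nil => simp
  | cons c cs ih =>
    by_cases hc : c = '?'
    · simp [pvFindFirst, hc] at h
      simpa [hc] using ih h
    · simp [pvFindFirst, hc] at h

-- ===== VERDICT (by name: the statement is the Claim_ definition above) =====
theorem row_shape_spec : Claim_equal_row_shape := by
  intro row _ hpre
  unfold Spec_row_shape row_shape row_shape_alt
  cases hf : pvFindFirst row.toList with
  | none =>
    exfalso
    have := pvFindFirst_none row.toList hf
    unfold Pre_row_shape at hpre
    simp only [List.any_eq_true] at hpre
    obtain ⟨c, hc, hne⟩ := hpre
    have hq := this c hc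
    simp [hq] at hne
  | some d =>
    obtain ⟨p, q, hdec, hp, hd⟩ := pvFindFirst_decomp row.toList d hf
    rw [hdec]
    have hfill : pvFillA d (d :: q) = d :: pvFillA d q := by simp [pvFillA, hd]
    have hnoq : ∀ c ∈ pvFillA d (d :: q), c ≠ '?' := pvFillA_no_q d hd _
    have hbl : pvBwd (pvFillA d (d :: q)) = (some d, pvFillA d (d :: q)) := by
      have := pvBwd_no_q (pvFillA d (d :: q)) hnoq
      rwa [hfill, List.head?_cons, ← hfill] at this
    have hfwd : pvFwd none (p ++ d :: q) = p ++ pvFillA d (d :: q) := by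
      rw [pvFwd_none_prefix p hp]
      simp [pvFwd, hd, pvFwd_some, hfill]
    rw [hfwd, pvBwd_prefix p hp d _ hbl]
    show String.mk (pvFillA d (p ++ d :: q)) = String.mk (List.map (fun _ => d) p ++ pvFillA d (d :: q))
    rw [pvFillA_prefix d p hp]
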